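-- pv_equiv track=rewrite | github.com/maverick0025/thesis_files | benchmarks/own/bm_dynamic_attributes_benchmark.py | dynamic_attribute_access
-- ===== SOURCE A (Python) =====
-- class DynamicClass:
--     def __init__(self):
--         self.value = 0
--
-- def dynamic_attribute_access(iterations):
--     """Forces attribute guard failures by dynamically modifying objects"""
--     obj = DynamicClass()
--     result = 0
--
--     for i in range(iterations):
--         # Dynamically add/remove attributes to break JIT assumptions
--         if i % 100 == 0:
--             if hasattr(obj, 'dynamic_attr'):
--                 delattr(obj, 'dynamic_attr')
--             else:
--                 obj.dynamic_attr = i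
--
--         # This will cause side exits as object layout keeps changing
--         try:
--             result += obj.value
--             if hasattr(obj, 'dynamic_attr'):
--                 result += obj.dynamic_attr
--         except AttributeError:
--             result += 1
--
--     return result
-- ===== SOURCE B (Python) =====
-- def dynamic_attribute_access(iterations):
--     """Closed-form: attr is present (value 200*k) exactly during iterations
--     [200*k, 200*k + 100); obj.value is always 0. Sum the arithmetic series."""
--     if iterations <= 0:
--         return 0
--     q, r = divmod(iterations, 200)
--     return 10000 * q * (q - 1) + 200 * q * min(r, 100)
-- ===== Notes on version B (the rewrite author's own statement) =====
-- stated objective: faster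
-- what changed: Replaced the O(n) simulation loop (toggling the attribute every 100 iterations and summing it) by an O(1) closed-form arithmetic-series formula over the 200-iteration on/off blocks.
import Mathlib
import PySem

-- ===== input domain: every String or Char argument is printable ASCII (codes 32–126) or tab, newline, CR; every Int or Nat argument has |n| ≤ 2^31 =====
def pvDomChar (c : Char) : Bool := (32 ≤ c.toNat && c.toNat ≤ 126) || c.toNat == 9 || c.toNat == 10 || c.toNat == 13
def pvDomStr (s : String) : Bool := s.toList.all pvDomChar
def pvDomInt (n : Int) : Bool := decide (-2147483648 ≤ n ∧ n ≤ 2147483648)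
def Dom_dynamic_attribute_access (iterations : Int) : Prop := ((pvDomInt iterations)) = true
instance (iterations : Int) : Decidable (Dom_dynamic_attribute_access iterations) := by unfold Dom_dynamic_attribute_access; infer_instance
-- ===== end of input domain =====

-- B replaces A's O(n) attribute-toggling simulation loop by an O(1) closed-form
-- arithmetic-series formula over the 200-iteration on/off blocks (objective: faster).

-- ===== PORT A =====
-- Loop state = (hasattr(obj,'dynamic_attr'), obj.dynamic_attr (0 when never set), result).
-- obj.value is always 0 and the obj.dynamic_attr read is guarded by hasattr, so the
-- except AttributeError branch is unreachable and is transliterated away.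
def dynamic_attribute_access_step (st : Bool × Int × Int) (i : Int) : Bool × Int × Int :=
  let st1 :=
    if PySem.Int.mod i 100 = 0 then
      if st.1 then (false, st.2.1, st.2.2)
      else (true, i, st.2.2)
    else st
  -- result += obj.value (obj.value = 0); then result += obj.dynamic_attr if present
  let res := st1.2.2 + 0
  let res := if st1.1 then res + st1.2.1 else res
  (st1.1, st1.2.1, res)

def dynamic_attribute_access (iterations : Int) : Int :=
  ((PySem.List.pyRange 0 iterations 1).foldl dynamic_attribute_access_step (false, 0, 0)).2.2

-- ===== PORT B =====
def dynamic_attribute_access_alt (iterations : Int) : Int :=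
  if iterations ≤ 0 then 0
  else
    let q := PySem.Int.floordiv iterations 200
    let r := PySem.Int.mod iterations 200
    10000 * q * (q - 1) + 200 * q * min r 100

-- ===== PRECONDITION & SPEC =====
def Spec_dynamic_attribute_access (iterations : Int) (out : Int) : Prop := out = dynamic_attribute_access_alt iterations
instance (iterations : Int) (out : Int) : Decidable (Spec_dynamic_attribute_access iterations out) := by unfold Spec_dynamic_attribute_access; infer_instance

-- ===== CLAIM (what is proved, stated in full; the proofs are below) =====
def Claim_equal_dynamic_attribute_access : Prop := ∀ (iterations : Int), Dom_dynamic_attribute_access iterations → Spec_dynamic_attribute_access iterations (dynamic_attribute_access iterations)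

-- ===== LEMMAS AND PROOFS =====

-- Closed-form loop state after processing i = 0, 1, …, n-1:
-- the attribute is present iff the last toggle (at 100⌊(n-1)/100⌋) was an "on" toggle,
-- its value is the last "on" toggle point 200⌊(n-1)/200⌋, and the accumulated result
-- is B's block formula.
def pvHasF (n : Nat) : Bool := decide (0 < n ∧ (n - 1) % 200 < 100)
def pvDvalF (n : Nat) : Nat := 200 * ((n - 1) / 200)
def pvResF (n : Nat) : Nat :=
  10000 * (n / 200) * (n / 200 - 1) + 200 * (n / 200) * min (n % 200) 100

theorem pvResF_succ_on (m : Nat) (h : m % 200 = 0) : pvResF (m + 1) = pvResF m + m := by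
  have d1 : (m + 1) / 200 = m / 200 := by omega
  have d2 : (m + 1) % 200 = 1 := by omega
  have hm : 200 * (m / 200) = m := by omega
  have m1 : min (1 : Nat) 100 = 1 := by norm_num
  have m0 : min (0 : Nat) 100 = 0 := by norm_num
  unfold pvResF
  rw [d1, d2, h, m1, m0]
  omega

theorem pvResF_succ_mid (m : Nat) (h1 : 1 ≤ m % 200) (h2 : m % 200 ≤ 99) :
    pvResF (m + 1) = pvResF m + 200 * ((m - 1) / 200) := by
  have d1 : (m + 1) / 200 = m / 200 := by omega
  have d2 : (m + 1) % 200 = m % 200 + 1 := by omega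
  have d3 : (m - 1) / 200 = m / 200 := by omega
  have m1 : min (m % 200 + 1) 100 = m % 200 + 1 := by omega
  have m2 : min (m % 200) 100 = m % 200 := by omega
  unfold pvResF
  rw [d1, d2, d3, m1, m2]
  set q := m / 200
  ring

theorem pvResF_succ_off (m : Nat) (h : 100 ≤ m % 200) : pvResF (m + 1) = pvResF m := by
  rcases Nat.lt_or_ge (m % 200) 199 with h199 | h199
  · have d1 : (m + 1) / 200 = m / 200 := by omega
    have m1 : min ((m + 1) % 200) 100 = 100 := by omega
    have m2 : min (m % 200) 100 = 100 := by omega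
    unfold pvResF
    rw [d1, m1, m2]
  · have h199' : m % 200 = 199 := by omega
    have d1 : (m + 1) / 200 = m / 200 + 1 := by omega
    have d2 : (m + 1) % 200 = 0 := by omega
    have m2 : min (m % 200) 100 = 100 := by omega
    have m0 : min (0 : Nat) 100 = 0 := by norm_num
    unfold pvResF
    rw [d1, d2, m2, m0]
    rcases Nat.eq_zero_or_pos (m / 200) with h0 | h0
    · rw [h0]
    · obtain ⟨p, hp⟩ : ∃ p, m / 200 = p + 1 := ⟨m / 200 - 1, by omega⟩
      rw [hp]
      simp only [Nat.add_sub_cancel]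
      ring

-- One loop iteration maps the closed-form state at m to the one at m+1.
theorem pvStep (m : Nat) :
    dynamic_attribute_access_step (pvHasF m, (pvDvalF m : Int), (pvResF m : Int)) (m : Nat)
      = (pvHasF (m + 1), (pvDvalF (m + 1) : Int), (pvResF (m + 1) : Int)) := by
  have hmod : PySem.Int.mod (m : Int) 100 = ((m % 100 : Nat) : Int) :=
    PySem.Int.mod_natCast m 100
  by_cases hc : m % 100 = 0
  · have hcast : PySem.Int.mod (m : Int) 100 = 0 := by rw [hmod]; exact_mod_cast hc
    rcases Nat.lt_or_ge (m % 200) 100 with hr | hr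
    · -- toggle point with the attribute absent: turn it ON with value m (m % 200 = 0)
      have h200 : m % 200 = 0 := by omega
      have hH : pvHasF m = false := by simp only [pvHasF, decide_eq_false_iff_not]; omega
      have hH' : pvHasF (m + 1) = true := by simp only [pvHasF, decide_eq_true_eq]; omega
      have hD' : pvDvalF (m + 1) = m := by unfold pvDvalF; omega
      simp only [dynamic_attribute_access_step, hcast, hH, hH', hD',
        Bool.false_eq_true, if_false, if_true, add_zero, Prod.mk.injEq]
      refine ⟨by trivial, by trivial, ?_⟩
      rw [pvResF_succ_on m h200]
      push_cast
      ring
    · -- toggle point with the attribute present: turn it OFF (m % 200 = 100)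
      have h200 : m % 200 = 100 := by omega
      have hH : pvHasF m = true := by simp only [pvHasF, decide_eq_true_eq]; omega
      have hH' : pvHasF (m + 1) = false := by simp only [pvHasF, decide_eq_false_iff_not]; omega
      have hD' : pvDvalF (m + 1) = pvDvalF m := by unfold pvDvalF; omega
      simp only [dynamic_attribute_access_step, hcast, hH, hH', hD',
        Bool.false_eq_true, if_false, if_true, add_zero, Prod.mk.injEq]
      refine ⟨by trivial, by trivial, ?_⟩
      rw [pvResF_succ_off m (by omega)]
  · have hcast : ¬ PySem.Int.mod (m : Int) 100 = 0 := by
      rw [hmod]; exact_mod_cast hc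
    have hD' : pvDvalF (m + 1) = pvDvalF m := by unfold pvDvalF; omega
    rcases Nat.lt_or_ge (m % 200) 100 with hr | hr
    · -- no toggle, attribute present: add its value 200⌊(m-1)/200⌋ (1 ≤ m % 200 ≤ 99)
      have hH : pvHasF m = true := by simp only [pvHasF, decide_eq_true_eq]; omega
      have hH' : pvHasF (m + 1) = true := by simp only [pvHasF, decide_eq_true_eq]; omega
      simp only [dynamic_attribute_access_step, hcast, if_false, hH, hH', hD',
        if_true, add_zero, Prod.mk.injEq]
      refine ⟨by trivial, by trivial, ?_⟩
      rw [pvResF_succ_mid m (by omega) (by omega)]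
      unfold pvDvalF
      push_cast
      ring
    · -- no toggle, attribute absent: nothing is added (101 ≤ m % 200 ≤ 199)
      have hH : pvHasF m = false := by simp only [pvHasF, decide_eq_false_iff_not]; omega
      have hH' : pvHasF (m + 1) = false := by simp only [pvHasF, decide_eq_false_iff_not]; omega
      simp only [dynamic_attribute_access_step, hcast, if_false, hH, hH', hD',
        Bool.false_eq_true, add_zero, Prod.mk.injEq]
      refine ⟨by trivial, by trivial, ?_⟩
      rw [pvResF_succ_off m (by omega)]

theorem pvState_eq (n : Nat) :
    (PySem.List.pyRange 0 (n : Int) 1).foldl dynamic_attribute_access_step (false, 0, 0)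
      = (pvHasF n, (pvDvalF n : Int), (pvResF n : Int)) := by
  induction n with
  | zero => simp [PySem.List.pyRange_one_eq_nil, pvHasF, pvDvalF, pvResF]
  | succ m ih =>
    have h : ((m + 1 : Nat) : Int) = (m : Int) + 1 := by push_cast; ring
    rw [h, PySem.List.pyRange_one_succ_right (by positivity), List.foldl_append, ih]
    simpa using pvStep m

-- ===== VERDICT (by name: the statement is the Claim_ definition above) =====
theorem dynamic_attribute_access_spec : Claim_equal_dynamic_attribute_access := by
  intro n _
  unfold Spec_dynamic_attribute_access dynamic_attribute_access dynamic_attribute_access_alt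
  by_cases hn : n ≤ 0
  · rw [PySem.List.pyRange_one_eq_nil hn]
    simp [hn]
  · have hN : n = ((n.toNat : Nat) : Int) := by omega
    rw [if_neg hn, hN, pvState_eq]
    set N := n.toNat with hNdef
    rw [PySem.Int.floordiv_eq_ediv_of_pos (by norm_num),
        PySem.Int.mod_eq_emod_of_pos (by norm_num)]
    have hq : ((N / 200 : Nat) : Int) = (N : Int) / 200 := by omega
    have hm : ((N % 200 : Nat) : Int) = (N : Int) % 200 := by omega
    rw [← hq, ← hm]
    dsimp only
    have hmin : min (((N % 200 : Nat) : Int)) 100 = ((min (N % 200) 100 : Nat) : Int) := by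
      push_cast; omega
    rw [hmin]
    rcases Nat.eq_zero_or_pos (N / 200) with h0 | h0
    · simp [pvResF, h0]
    · obtain ⟨p, hp⟩ : ∃ p, N / 200 = p + 1 := ⟨N / 200 - 1, by omega⟩
      unfold pvResF
      rw [hp, Nat.add_sub_cancel]
      push_cast
      ring
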